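-- pv_equiv track=rewrite | github.com/yutianlee/opsf | src/certsf/backends/arb_backend.py | _parse_complex_text
-- ===== SOURCE A (Python) =====
-- def _parse_complex_text(text: str) -> tuple[str, str]:
--     body = text.replace(" ", "").replace("i", "j")
--     if not body.lower().endswith("j"):
--         return body, "0"
--     body = body[:-1]
--     if body in {"", "+"}:
--         return "0", "1"
--     if body == "-":
--         return "0", "-1"
--
--     split_at = None
--     for index in range(len(body) - 1, 0, -1):
--         if body[index] in "+-" and body[index - 1] not in "eE":
--             split_at = index
--             break
--     if split_at is None:
--         return "0", _normalize_imaginary_component(body)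
--     real = body[:split_at]
--     imag = _normalize_imaginary_component(body[split_at:])
--     return real, imag
--
-- def _normalize_imaginary_component(value: str) -> str:
--     if value in {"", "+"}:
--         return "1"
--     if value == "-":
--         return "-1"
--     return value
-- ===== SOURCE B (Python) =====
-- def _parse_complex_text(text: str) -> tuple[str, str]:
--     body = text.replace(" ", "").replace("i", "j")
--     if not body.lower().endswith("j"):
--         return body, "0"
--     body = body[:-1]
--     # Mask exponent signs so the remaining '+'/'-' are all valid split points,
--     # then let the builtin rfind locate the split (no explicit scanning loop).
--     masked = (body.replace("e+", "e*").replace("e-", "e*")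
--                   .replace("E+", "E*").replace("E-", "E*"))
--     cut = max(masked.rfind("+", 1), masked.rfind("-", 1))
--     real, imag = ("", body) if cut == -1 else (body[:cut], body[cut:])
--     if real == "":
--         real = "0"
--     if imag in ("", "+"):
--         imag = "1"
--     elif imag == "-":
--         imag = "-1"
--     return real, imag
-- ===== Notes on version B (the rewrite author's own statement) =====
-- stated objective: idiomatic
-- what changed: Replaces A's special-case ladder and explicit backward character-scanning loop with builtin string operations: str.replace masks the exponent signs so every remaining sign is a valid split point, str.rfind locates the split, and uniform post-split fixups subsume the degenerate-body special cases and the normalization helper.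
import Mathlib
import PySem

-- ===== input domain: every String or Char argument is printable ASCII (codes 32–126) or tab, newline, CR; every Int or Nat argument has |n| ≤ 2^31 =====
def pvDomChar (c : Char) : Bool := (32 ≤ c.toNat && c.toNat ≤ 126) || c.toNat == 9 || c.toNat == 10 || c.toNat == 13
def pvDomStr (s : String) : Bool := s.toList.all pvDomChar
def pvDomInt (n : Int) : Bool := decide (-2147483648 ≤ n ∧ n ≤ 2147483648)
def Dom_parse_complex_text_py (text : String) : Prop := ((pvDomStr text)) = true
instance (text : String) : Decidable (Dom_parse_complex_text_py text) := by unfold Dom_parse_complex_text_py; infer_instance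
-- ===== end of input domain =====

-- B drops A's special-case ladder and explicit backward scanning loop: it masks the exponent
-- signs with str.replace and delegates the split-point search to the builtin str.rfind
-- (objective: idiomatic; same return value on every input).

-- ===== PORT A =====
-- the split condition `body[index] in "+-" and body[index - 1] not in "eE"`
def pvCond (body : List Char) (i : Int) : Bool :=
  let c := (PySem.List.pyGet? body i).getD ' '
  let p := (PySem.List.pyGet? body (i - 1)).getD ' '
  (c = '+' || c = '-') && !(p = 'e' || p = 'E')

-- _normalize_imaginary_component
def pvNormA (value : List Char) : List Char :=
  if value = [] ∨ value = ['+'] then ['1']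
  else if value = ['-'] then ['-', '1']
  else value

-- A's backward for-loop with break: first index in the descending range satisfying the condition
def pvFindA (body : List Char) : List Int → Option Int
  | [] => none
  | i :: rest => if pvCond body i then some i else pvFindA body rest

-- A's code after `body = body[:-1]` (body is already the stripped string)
def pvTailA (body : List Char) : List Char × List Char :=
  if body = [] ∨ body = ['+'] then (['0'], ['1'])
  else if body = ['-'] then (['0'], ['-', '1'])
  else
    match pvFindA body (PySem.List.pyRange ((body.length : Int) - 1) 0 (-1)) with
    | none => (['0'], pvNormA body)
    | some k =>
        (PySem.List.slice body none (some k),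
         pvNormA (PySem.List.slice body (some k) none))

def parse_complex_text_py (text : String) : String × String :=
  let body := PySem.Chars.replace (PySem.Chars.replace text.toList [' '] []) ['i'] ['j']
  if !PySem.Chars.endswith (PySem.Chars.lower body) ['j'] then
    (String.ofList body, String.ofList ['0'])
  else
    let out := pvTailA (PySem.List.slice body none (some (-1)))
    (String.ofList out.1, String.ofList out.2)

-- ===== PORT B =====
-- B's code after `body = body[:-1]`: mask "e+","e-","E+","E-" via str.replace, then
-- cut = max(masked.rfind("+", 1), masked.rfind("-", 1)), uniform slicing and fixups
def pvTailB (body : List Char) : List Char × List Char :=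
  let masked := PySem.Chars.replace (PySem.Chars.replace (PySem.Chars.replace
      (PySem.Chars.replace body ['e', '+'] ['e', '*']) ['e', '-'] ['e', '*'])
      ['E', '+'] ['E', '*']) ['E', '-'] ['E', '*']
  let cut := max (PySem.Chars.rfindFrom masked ['+'] 1 none)
                 (PySem.Chars.rfindFrom masked ['-'] 1 none)
  let ri := if cut = -1 then (([] : List Char), body)
            else (PySem.List.slice body none (some cut), PySem.List.slice body (some cut) none)
  let real := if ri.1 = [] then ['0'] else ri.1
  let imag := if ri.2 = [] ∨ ri.2 = ['+'] then ['1']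
              else if ri.2 = ['-'] then ['-', '1'] else ri.2
  (real, imag)

def parse_complex_text_py_alt (text : String) : String × String :=
  let body := PySem.Chars.replace (PySem.Chars.replace text.toList [' '] []) ['i'] ['j']
  if !PySem.Chars.endswith (PySem.Chars.lower body) ['j'] then
    (String.ofList body, String.ofList ['0'])
  else
    let out := pvTailB (PySem.List.slice body none (some (-1)))
    (String.ofList out.1, String.ofList out.2)

-- ===== PRECONDITION & SPEC =====
def Spec_parse_complex_text_py (text : String) (out : String × String) : Prop := out = parse_complex_text_py_alt text
instance (text : String) (out : String × String) : Decidable (Spec_parse_complex_text_py text out) := by unfold Spec_parse_complex_text_py; infer_instance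

-- ===== CLAIM (what is proved, stated in full; the proofs are below) =====
def Claim_equal_parse_complex_text_py : Prop := ∀ (text : String), Dom_parse_complex_text_py text → Spec_parse_complex_text_py text (parse_complex_text_py text)

-- ===== LEMMAS AND PROOFS =====

-- pointwise model of one two-character replace  s.replace(a ++ x, a ++ y)  (p = previous char)
def pvMaskGo (a x y p : Char) : List Char → List Char
  | [] => []
  | c :: t => (if p = a ∧ c = x then y else c) :: pvMaskGo a x y c t

def pvMask (a x y : Char) (s : List Char) : List Char :=
  match s with
  | [] => []
  | c :: t => c :: pvMaskGo a x y c t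

theorem pvMaskGo_eq_of_not_prefix {a x y c : Char} {t : List Char}
    (h : ¬ ([a, x].isPrefixOf (c :: t) = true)) :
    pvMaskGo a x y c t = pvMask a x y t := by
  cases t with
  | nil => rfl
  | cons d t' =>
      simp [List.isPrefixOf] at h
      have : ¬ (c = a ∧ d = x) := by
        intro hcd
        obtain ⟨h1, h2⟩ := hcd
        subst h1; subst h2
        simp at h
      simp [pvMaskGo, pvMask, if_neg this]

theorem pvMaskGo_eq_of_ne {a x y p : Char} (h : p ≠ a) (t : List Char) :
    pvMaskGo a x y p t = pvMask a x y t := by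
  cases t with
  | nil => rfl
  | cons d t' =>
      have : ¬ (p = a ∧ d = x) := fun hc => h hc.1
      simp [pvMaskGo, pvMask, if_neg this]

theorem pvReplGo_spec {a x y : Char} (hax : a ≠ x) :
    ∀ (fuel : Nat) (l acc : List Char), l.length ≤ fuel →
      PySem.Chars.replace.go [a, x] [a, y] fuel l acc = acc.reverse ++ pvMask a x y l := by
  intro fuel
  induction fuel with
  | zero =>
      intro l acc hl
      have : l = [] := List.eq_nil_of_length_eq_zero (Nat.le_zero.mp hl)
      subst this
      simp [PySem.Chars.replace.go, pvMask]
  | succ fuel ih =>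
      intro l acc hl
      cases l with
      | nil => simp [PySem.Chars.replace.go, pvMask]
      | cons c t =>
          by_cases hpre : [a, x].isPrefixOf (c :: t) = true
          · obtain ⟨hc, t', ht⟩ : c = a ∧ ∃ t', t = x :: t' := by
              cases t with
              | nil => simp [List.isPrefixOf] at hpre
              | cons d t' =>
                  simp [List.isPrefixOf] at hpre
                  exact ⟨hpre.1.symm, t', by rw [hpre.2]⟩
            subst hc ht
            have hgo : PySem.Chars.replace.go [c, x] [c, y] (fuel + 1) (c :: x :: t') acc
                = PySem.Chars.replace.go [c, x] [c, y] fuel t' ([y, c] ++ acc) := by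
              simp [PySem.Chars.replace.go, hpre]
            rw [hgo, ih t' ([y, c] ++ acc) (by simp at hl ⊢; omega)]
            have hmask : pvMask c x y (c :: x :: t') = c :: y :: pvMask c x y t' := by
              simp [pvMask, pvMaskGo, pvMaskGo_eq_of_ne (Ne.symm hax)]
            rw [hmask]
            simp
          · have hgo : PySem.Chars.replace.go [a, x] [a, y] (fuel + 1) (c :: t) acc
                = PySem.Chars.replace.go [a, x] [a, y] fuel t (c :: acc) := by
              simp [PySem.Chars.replace.go, hpre]
            rw [hgo, ih t (c :: acc) (by simp at hl ⊢; omega)]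
            have : pvMask a x y (c :: t) = c :: pvMaskGo a x y c t := rfl
            rw [this, pvMaskGo_eq_of_not_prefix hpre]
            simp

theorem pvRepl_eq {a x y : Char} (hax : a ≠ x) (s : List Char) :
    PySem.Chars.replace s [a, x] [a, y] = pvMask a x y s := by
  have : ([a, x].isEmpty) = false := rfl
  simp only [PySem.Chars.replace, this]
  simpa using pvReplGo_spec hax s.length s [] (le_refl _)

theorem pvMaskGo_length (a x y : Char) : ∀ (t : List Char) (p : Char),
    (pvMaskGo a x y p t).length = t.length := by
  intro t
  induction t with
  | nil => intro p; rfl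
  | cons c t' ih => intro p; simp [pvMaskGo, ih]

theorem pvMask_length (a x y : Char) (s : List Char) :
    (pvMask a x y s).length = s.length := by
  cases s with
  | nil => rfl
  | cons c t => simp [pvMask, pvMaskGo_length]

theorem pvMaskGo_get (a x y : Char) : ∀ (t : List Char) (p : Char) (i : Nat),
    (pvMaskGo a x y p t)[i]? =
      if (if i = 0 then some p else t[i-1]?) = some a ∧ t[i]? = some x
      then some y else t[i]? := by
  intro t
  induction t with
  | nil => intro p i; simp [pvMaskGo]
  | cons c t' ih =>
      intro p i
      cases i with
      | zero => by_cases h : p = a ∧ c = x <;> simp [pvMaskGo, h]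
      | succ j =>
          simp only [pvMaskGo, List.getElem?_cons_succ]
          rw [ih c j]
          cases j with
          | zero => simp
          | succ j' => simp

theorem pvMask_get_succ (a x y : Char) (s : List Char) (i : Nat) :
    (pvMask a x y s)[i+1]? =
      if s[i]? = some a ∧ s[i+1]? = some x then some y else s[i+1]? := by
  cases s with
  | nil => simp [pvMask]
  | cons c t =>
      simp only [pvMask, List.getElem?_cons_succ, pvMaskGo_get]
      cases i with
      | zero => simp
      | succ j => simp

theorem pvMask_get_zero (a x y : Char) (s : List Char) :
    (pvMask a x y s)[0]? = s[0]? := by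
  cases s <;> rfl

theorem pvMask_preserve {a x y ch : Char} (hy : ch ≠ y) (hx : ch ≠ x)
    (s : List Char) (j : Nat) :
    ((pvMask a x y s)[j]? = some ch) ↔ (s[j]? = some ch) := by
  cases j with
  | zero => rw [pvMask_get_zero]
  | succ i =>
      rw [pvMask_get_succ]
      split_ifs with h
      · constructor
        · intro hcontr; exact absurd (Option.some.inj hcontr).symm hy
        · intro hcontr
          rw [hcontr] at h
          exact absurd (Option.some.inj h.2) hx
      · exact Iff.rfl

-- the full mask pipeline
def pvMaskAll (b : List Char) : List Char :=
  pvMask 'E' '-' '*' (pvMask 'E' '+' '*' (pvMask 'e' '-' '*' (pvMask 'e' '+' '*' b)))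

theorem pvMaskAll_eq (b : List Char) :
    PySem.Chars.replace (PySem.Chars.replace (PySem.Chars.replace
      (PySem.Chars.replace b ['e', '+'] ['e', '*']) ['e', '-'] ['e', '*'])
      ['E', '+'] ['E', '*']) ['E', '-'] ['E', '*'] = pvMaskAll b := by
  rw [pvRepl_eq (by decide), pvRepl_eq (by decide), pvRepl_eq (by decide),
      pvRepl_eq (by decide)]
  rfl

theorem pvMaskAll_length (b : List Char) : (pvMaskAll b).length = b.length := by
  simp [pvMaskAll, pvMask_length]

theorem pvMaskAll_get_succ (b : List Char) (i : Nat) :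
    (pvMaskAll b)[i+1]? =
      if (b[i]? = some 'e' ∨ b[i]? = some 'E') ∧ (b[i+1]? = some '+' ∨ b[i+1]? = some '-')
      then some '*' else b[i+1]? := by
  have pres : ∀ (a x y ch : Char), ch ≠ y → ch ≠ x → ∀ (s : List Char) (j : Nat),
      ((pvMask a x y s)[j]? = some ch) ↔ (s[j]? = some ch) :=
    fun a x y ch hy hx s j => pvMask_preserve hy hx s j
  have hE3 : ((pvMask 'E' '+' '*' (pvMask 'e' '-' '*' (pvMask 'e' '+' '*' b)))[i]? = some 'E')
      ↔ (b[i]? = some 'E') := by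
    rw [pres 'E' '+' '*' 'E' (by decide) (by decide),
        pres 'e' '-' '*' 'E' (by decide) (by decide),
        pres 'e' '+' '*' 'E' (by decide) (by decide)]
  have hE2 : ((pvMask 'e' '-' '*' (pvMask 'e' '+' '*' b))[i]? = some 'E')
      ↔ (b[i]? = some 'E') := by
    rw [pres 'e' '-' '*' 'E' (by decide) (by decide),
        pres 'e' '+' '*' 'E' (by decide) (by decide)]
  have he1 : ((pvMask 'e' '+' '*' b)[i]? = some 'e') ↔ (b[i]? = some 'e') := by
    rw [pres 'e' '+' '*' 'e' (by decide) (by decide)]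
  show (pvMask 'E' '-' '*' _)[i+1]? = _
  rw [pvMask_get_succ, pvMask_get_succ, pvMask_get_succ, pvMask_get_succ]
  simp only [hE3, hE2, he1]
  by_cases hp : b[i+1]? = some '+' <;> by_cases hm : b[i+1]? = some '-'
  · rw [hp] at hm; simp at hm
  · by_cases he : b[i]? = some 'e' <;> by_cases hE : b[i]? = some 'E'
    · rw [he] at hE; simp at hE
    · simp [he, hp]
    · simp [hE, hp]
    · simp [he, hE, hp]
  · by_cases he : b[i]? = some 'e' <;> by_cases hE : b[i]? = some 'E'
    · rw [he] at hE; simp at hE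
    · simp [he, hm]
    · simp [hE, hm]
    · simp [he, hE, hm]
  · by_cases he : b[i]? = some 'e' <;> by_cases hE : b[i]? = some 'E'
    · rw [he] at hE; simp at hE
    · simp [he, hp, hm]
    · simp [hE, hp, hm]
    · simp [he, hE, hp, hm]

-- the common "last valid sign below m" recursion; none = no split
def pvG (P : Nat → Bool) : Nat → Option Nat
  | 0 => none
  | m + 1 => if 1 ≤ m ∧ P m = true then some m else pvG P m

theorem pvG_congr {P Q : Nat → Bool} (h : ∀ i, 1 ≤ i → P i = Q i) :
    ∀ m, pvG P m = pvG Q m := by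
  intro m
  induction m with
  | zero => rfl
  | succ m ih =>
      by_cases h1 : 1 ≤ m
      · simp only [pvG, h m h1, ih]
      · simp only [pvG, ih]
        have : ¬ (1 ≤ m ∧ P m = true) := fun hc => h1 hc.1
        have h2 : ¬ (1 ≤ m ∧ Q m = true) := fun hc => h1 hc.1
        rw [if_neg this, if_neg h2]

theorem pvG_some {P : Nat → Bool} : ∀ {m k : Nat}, pvG P m = some k → 1 ≤ k ∧ k < m := by
  intro m
  induction m with
  | zero => intro k h; simp [pvG] at h
  | succ m ih =>
      intro k h
      simp only [pvG] at h
      split_ifs at h with hc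
      · obtain rfl : m = k := Option.some.inj h
        exact ⟨hc.1, Nat.lt_succ_self _⟩
      · obtain ⟨h1, h2⟩ := ih h
        exact ⟨h1, Nat.lt_succ_of_lt h2⟩

-- A's descending search equals pvG
theorem pvRange_desc_cons (m : Nat) :
    PySem.List.pyRange ((m + 1 : Nat) : Int) 0 (-1)
      = ((m + 1 : Nat) : Int) :: PySem.List.pyRange (m : Int) 0 (-1) := by
  rw [PySem.List.pyRange_neg_one_eq_reverse, PySem.List.pyRange_neg_one_eq_reverse]
  rw [show ((m + 1 : Nat) : Int) + 1 = ((m : Int) + 1) + 1 by push_cast; ring]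
  rw [PySem.List.pyRange_one_succ_right (by push_cast; omega)]
  simp

theorem pvFindA_eq_pvG (b : List Char) : ∀ (m : Nat),
    pvFindA b (PySem.List.pyRange (m : Int) 0 (-1))
      = (pvG (fun i => pvCond b (i : Int)) (m + 1)).map (fun i => (i : Int)) := by
  intro m
  induction m with
  | zero =>
      have : PySem.List.pyRange ((0 : Nat) : Int) 0 (-1) = [] := by decide
      rw [this]
      simp [pvFindA, pvG]
  | succ m ih =>
      rw [pvRange_desc_cons]
      by_cases h : pvCond b ((m + 1 : Nat) : Int)
      · have hG : pvG (fun i => pvCond b (i : Int)) (m + 2) = some (m + 1) := by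
          simp only [pvG]
          rw [if_pos ⟨by omega, h⟩]
        simp only [pvFindA, if_pos h, hG]
        rfl
      · have hG : pvG (fun i => pvCond b (i : Int)) (m + 2) = pvG (fun i => pvCond b (i : Int)) (m + 1) := by
          have : ¬ (1 ≤ m + 1 ∧ pvCond b ((m + 1 : Nat) : Int) = true) := fun hc => h hc.2
          simp only [pvG, if_neg this]
        simp only [pvFindA, if_neg h, hG, ih]

-- translation of PySem.Chars.rfind.go for a single-character needle
def pvH (l : List Char) (c : Char) : Nat → Int
  | 0 => if l[0]? = some c then 0 else -1
  | j + 1 => if l[j+1]? = some c then ((j + 1 : Nat) : Int) else pvH l c j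

theorem pvPrefix_single (c : Char) (l : List Char) :
    ([c].isPrefixOf l = true) ↔ l[0]? = some c := by
  cases l with
  | nil => simp [List.isPrefixOf]
  | cons c t =>
      simp [List.isPrefixOf]
      exact eq_comm

theorem pvRfindGo_eq (l : List Char) (c : Char) : ∀ (j : Nat),
    PySem.Chars.rfind.go l [c] j = pvH l c j := by
  intro j
  induction j with
  | zero =>
      simp only [PySem.Chars.rfind.go, pvH]
      by_cases h : l[0]? = some c
      · rw [if_pos ((pvPrefix_single c l).mpr h), if_pos h]
      · rw [if_neg (fun hc => h ((pvPrefix_single c l).mp hc)), if_neg h]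
  | succ j ih =>
      have hpre : ([c].isPrefixOf (l.drop (j+1)) = true) ↔ l[j+1]? = some c := by
        rw [pvPrefix_single]
        simp [List.getElem?_drop]
      simp only [PySem.Chars.rfind.go, pvH]
      by_cases h : l[j+1]? = some c
      · rw [if_pos (hpre.mpr h), if_pos h]
      · rw [if_neg (fun hc => h (hpre.mp hc)), if_neg h, ← ih]

-- the "last occurrence of c at index in [1, m)" recursion, -1 = absent
def pvHc (M : List Char) (c : Char) : Nat → Int
  | 0 => -1
  | m + 1 => if 1 ≤ m ∧ M[m]? = some c then (m : Int) else pvHc M c m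

theorem pvHc_lt (M : List Char) (c : Char) : ∀ m, pvHc M c m < (m : Int) ∧ -1 ≤ pvHc M c m := by
  intro m
  induction m with
  | zero => simp [pvHc]
  | succ m ih =>
      simp only [pvHc]
      split_ifs with h
      · constructor <;> [push_cast; skip] <;> omega
      · obtain ⟨h1, h2⟩ := ih
        constructor
        · calc pvHc M c m < (m : Int) := h1
            _ ≤ ((m + 1 : Nat) : Int) := by push_cast; omega
        · exact h2

theorem pvH_shift (M : List Char) (c : Char) : ∀ (j : Nat),
    (if pvH (M.drop 1) c j = -1 then (-1 : Int) else 1 + pvH (M.drop 1) c j)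
      = pvHc M c (j + 2) := by
  intro j
  induction j with
  | zero =>
      have h0 : (M.drop 1)[0]? = M[1]? := by
        rw [List.getElem?_drop]
      simp only [pvH, pvHc, h0]
      by_cases h : M[1]? = some c
      · simp [h]
      · simp [h]
  | succ j ih =>
      have h0 : (M.drop 1)[j+1]? = M[j+2]? := by
        rw [List.getElem?_drop]
        congr 1
        omega
      have hRHS : pvHc M c (j + 1 + 2) =
          if 1 ≤ j + 2 ∧ M[j+2]? = some c then ((j + 2 : Nat) : Int) else pvHc M c (j + 2) := rfl
      have hdef : pvH (M.drop 1) c (j + 1) =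
          if (M.drop 1)[j+1]? = some c then ((j + 1 : Nat) : Int) else pvH (M.drop 1) c j := rfl
      by_cases h : M[j+2]? = some c
      · have hval : pvH (M.drop 1) c (j + 1) = ((j + 1 : Nat) : Int) := by
          rw [hdef, h0, if_pos h]
        have hne : ((j + 1 : Nat) : Int) ≠ -1 := by push_cast; omega
        rw [hval, if_neg hne, hRHS, if_pos (And.intro (by omega) h)]
        push_cast
        ring
      · have hval : pvH (M.drop 1) c (j + 1) = pvH (M.drop 1) c j := by
          rw [hdef, h0, if_neg h]
        have hnc : ¬ (1 ≤ j + 2 ∧ M[j+2]? = some c) := fun hc => h hc.2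
        rw [hval, hRHS, if_neg hnc]
        exact ih

theorem pvRfindFrom_char (M : List Char) (c : Char) :
    PySem.Chars.rfindFrom M [c] 1 none = pvHc M c M.length := by
  match hM : M.length with
  | 0 =>
      have : M = [] := List.eq_nil_of_length_eq_zero hM
      subst this
      simp [PySem.Chars.rfindFrom, pvHc]
  | (m + 1) =>
      have hlt : ¬ ((M.length : Int) < 1) := by rw [hM]; push_cast; omega
      have hdlen : (M.drop 1).length = m := by simp [hM]
      have hne : M ≠ [] := by intro h; rw [h] at hM; simp at hM
      simp only [PySem.Chars.rfindFrom, PySem.Chars.rfind]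
      norm_num
      rw [if_neg hne, show M.tail = M.drop 1 from List.drop_one ▸ rfl, pvRfindGo_eq, hM]
      simp only [Nat.succ_sub_one]
      cases m with
      | zero =>
          have hnil : M.drop 1 = [] := List.eq_nil_of_length_eq_zero hdlen
          rw [hnil]
          simp [pvH, pvHc]
      | succ k =>
          have hnone : (M.drop 1)[k+1]? = none := by
            rw [List.getElem?_eq_none_iff, hdlen]
          have hstep : pvH (M.drop 1) c (k+1) = pvH (M.drop 1) c k := by
            rw [show pvH (M.drop 1) c (k+1)
                = if (M.drop 1)[k+1]? = some c then ((k + 1 : Nat) : Int)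
                  else pvH (M.drop 1) c k from rfl, hnone]
            simp
          rw [hstep]
          exact pvH_shift M c k

theorem pvMax_Hc (M : List Char) : ∀ (m : Nat),
    max (pvHc M '+' m) (pvHc M '-' m)
      = (pvG (fun i => (M[i]? == some '+') || (M[i]? == some '-')) m).elim (-1) (fun i => (i : Int)) := by
  intro m
  induction m with
  | zero => simp [pvHc, pvG]
  | succ m ih =>
      by_cases h1 : 1 ≤ m
      · by_cases hp : M[m]? = some '+'
        · have hm : M[m]? ≠ some '-' := by rw [hp]; simp
          have hG : pvG (fun i => (M[i]? == some '+') || (M[i]? == some '-')) (m+1) = some m := by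
            simp [pvG, h1, hp]
          rw [hG]
          have hplus : pvHc M '+' (m+1) = (m : Int) := by simp [pvHc, h1, hp]
          have hminus : pvHc M '-' (m+1) = pvHc M '-' m := by
            have : ¬ (1 ≤ m ∧ M[m]? = some '-') := fun hc => hm hc.2
            simp only [pvHc, if_neg this]
          rw [hplus, hminus]
          have := (pvHc_lt M '-' m).1
          simp only [Option.elim]
          omega
        · by_cases hm : M[m]? = some '-'
          · have hG : pvG (fun i => (M[i]? == some '+') || (M[i]? == some '-')) (m+1) = some m := by
              simp [pvG, h1, hm]
            rw [hG]
            have hminus : pvHc M '-' (m+1) = (m : Int) := by simp [pvHc, h1, hm]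
            have hplus : pvHc M '+' (m+1) = pvHc M '+' m := by
              have : ¬ (1 ≤ m ∧ M[m]? = some '+') := fun hc => hp hc.2
              simp only [pvHc, if_neg this]
            rw [hplus, hminus]
            have := (pvHc_lt M '+' m).1
            simp only [Option.elim]
            omega
          · have hG : pvG (fun i => (M[i]? == some '+') || (M[i]? == some '-')) (m+1)
                = pvG (fun i => (M[i]? == some '+') || (M[i]? == some '-')) m := by
              have : ¬ (1 ≤ m ∧ ((M[m]? == some '+') || (M[m]? == some '-')) = true) := by
                intro hc
                rcases hc with ⟨_, hc2⟩
                simp at hc2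
                rcases hc2 with hc2 | hc2
                · exact hp hc2
                · exact hm hc2
              simp only [pvG, if_neg this]
            have hplus : pvHc M '+' (m+1) = pvHc M '+' m := by
              have : ¬ (1 ≤ m ∧ M[m]? = some '+') := fun hc => hp hc.2
              simp only [pvHc, if_neg this]
            have hminus : pvHc M '-' (m+1) = pvHc M '-' m := by
              have : ¬ (1 ≤ m ∧ M[m]? = some '-') := fun hc => hm hc.2
              simp only [pvHc, if_neg this]
            rw [hG, hplus, hminus, ih]
      · have h0 : m = 0 := by omega
        subst h0
        simp [pvHc, pvG]

theorem pvCond_eq_mask (b : List Char) (j : Nat) :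
    pvCond b ((j + 1 : Nat) : Int)
      = (((pvMaskAll b)[j+1]? == some '+') || ((pvMaskAll b)[j+1]? == some '-')) := by
  have hc : PySem.List.pyGet? b ((j + 1 : Nat) : Int) = b[j+1]? := PySem.List.pyGet?_natCast b (j+1)
  have hidx : ((j + 1 : Nat) : Int) - 1 = ((j : Nat) : Int) := by push_cast; ring
  have hppre : PySem.List.pyGet? b (((j + 1 : Nat) : Int) - 1) = b[j]? := by
    rw [hidx]
    exact PySem.List.pyGet?_natCast b j
  unfold pvCond
  rw [hc, hppre, pvMaskAll_get_succ]
  by_cases hp : b[j+1]? = some '+' <;> by_cases hm : b[j+1]? = some '-'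
  · rw [hp] at hm; simp at hm
  all_goals (by_cases he : b[j]? = some 'e' <;> by_cases hE : b[j]? = some 'E')
  all_goals (try (rw [he] at hE; simp at hE))
  all_goals (cases hbj : b[j]? <;> cases hbj1 : b[j+1]? <;> simp_all)

theorem pvTail_eq (b : List Char) : pvTailA b = pvTailB b := by
  by_cases h1 : b = [] ∨ b = ['+']
  · rcases h1 with h | h <;> subst h <;> decide
  by_cases h2 : b = ['-']
  · subst h2; decide
  have hbne : b ≠ [] := fun h => h1 (Or.inl h)
  have hn : 1 ≤ b.length := List.length_pos_of_ne_nil hbne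
  have hcast : ((b.length : Int) - 1) = ((b.length - 1 : Nat) : Int) := by omega
  have hsucc : b.length - 1 + 1 = b.length := by omega
  have hPQ : ∀ (i : Nat), 1 ≤ i → (pvCond b (i : Int))
      = (((pvMaskAll b)[i]? == some '+') || ((pvMaskAll b)[i]? == some '-')) := by
    intro i hi
    obtain ⟨j, rfl⟩ : ∃ j, i = j + 1 := ⟨i - 1, by omega⟩
    exact pvCond_eq_mask b j
  unfold pvTailA pvTailB
  rw [if_neg h1, if_neg h2]
  simp only [pvMaskAll_eq, pvRfindFrom_char, pvMaskAll_length, pvMax_Hc, hcast,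
    pvFindA_eq_pvG, hsucc, pvG_congr hPQ b.length]
  cases hG : pvG (fun i => ((pvMaskAll b)[i]? == some '+') || ((pvMaskAll b)[i]? == some '-')) b.length with
  | none => simp [pvNormA]
  | some k =>
      obtain ⟨hk1, hk2⟩ := pvG_some hG
      have hkne : ((k : Nat) : Int) ≠ -1 := by omega
      simp [hkne, pvNormA]
      intro h
      rcases h with h | h
      · omega
      · exact absurd h hbne

theorem parse_complex_text_py_eq (text : String) :
    parse_complex_text_py text = parse_complex_text_py_alt text := by
  unfold parse_complex_text_py parse_complex_text_py_alt
  simp only [pvTail_eq]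

-- ===== VERDICT (by name: the statement is the Claim_ definition above) =====
theorem parse_complex_text_py_spec : Claim_equal_parse_complex_text_py := by
  intro text _
  exact parse_complex_text_py_eq text
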